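-- pv_equiv track=rewrite | github.com/TeresaTonelli/MuSt3Net | utils_function.py | create_list_duplicates
-- ===== SOURCE A (Python) =====
-- def create_list_duplicates(my_list, m):
--     """create a list that duplicates the elements of the original list m times"""
--     new_list = []
--     for element in my_list:
--         list_element = []
--         for i in range(m):
--             list_element.append(element)
--         new_list.extend(list_element)
--     return new_list
-- ===== SOURCE B (Python) =====
-- def create_list_duplicates(my_list, m):
--     """create a list that duplicates the elements of the original list m times"""
--     return [my_list[i // m] for i in range(len(my_list) * m)]
-- ===== Notes on version B (the rewrite author's own statement) =====
-- stated objective: simpler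
-- what changed: Replaces the nested element/repeat loops and intermediate per-element lists with a single flat comprehension over one running index, mapping each output position i to my_list[i // m] by integer division.
import Mathlib
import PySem

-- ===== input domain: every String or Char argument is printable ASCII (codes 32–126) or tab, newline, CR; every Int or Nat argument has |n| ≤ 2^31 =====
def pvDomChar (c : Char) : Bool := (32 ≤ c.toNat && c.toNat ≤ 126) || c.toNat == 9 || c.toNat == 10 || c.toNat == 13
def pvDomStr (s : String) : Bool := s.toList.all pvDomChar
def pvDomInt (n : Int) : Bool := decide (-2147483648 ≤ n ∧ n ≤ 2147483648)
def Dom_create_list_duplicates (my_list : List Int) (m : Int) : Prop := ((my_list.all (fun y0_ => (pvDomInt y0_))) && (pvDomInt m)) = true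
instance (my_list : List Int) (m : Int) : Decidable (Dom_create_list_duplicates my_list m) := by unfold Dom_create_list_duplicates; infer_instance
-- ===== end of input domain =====

-- B replaces A's nested element/repeat loops with one flat comprehension over a running
-- index, mapping position i to my_list[i // m]; objective: simpler (same O(n·m) cost).

-- ===== PORT A =====
def create_list_duplicates (my_list : List Int) (m : Int) : List Int :=
  my_list.foldl (fun new_list element =>
    new_list ++ ((PySem.List.pyRange 0 m 1).foldl (fun list_element _ => list_element ++ [element]) [])) []

-- ===== PORT B =====
-- the index i // m always satisfies 0 ≤ i // m < len(my_list) (the range is empty when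
-- m ≤ 0), so Python's my_list[i // m] never raises; pyGetD with default 0 is exact here.
def create_list_duplicates_alt (my_list : List Int) (m : Int) : List Int :=
  (PySem.List.pyRange 0 (↑my_list.length * m) 1).map
    (fun i => PySem.List.pyGetD my_list (PySem.Int.floordiv i m) 0)

-- ===== PRECONDITION & SPEC =====
def Spec_create_list_duplicates (my_list : List Int) (m : Int) (out : List Int) : Prop := out = create_list_duplicates_alt my_list m
instance (my_list : List Int) (m : Int) (out : List Int) : Decidable (Spec_create_list_duplicates my_list m out) := by unfold Spec_create_list_duplicates; infer_instance

-- ===== CLAIM (what is proved, stated in full; the proofs are below) =====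
def Claim_equal_create_list_duplicates : Prop := ∀ (my_list : List Int) (m : Int), Dom_create_list_duplicates my_list m → Spec_create_list_duplicates my_list m (create_list_duplicates my_list m)

-- ===== LEMMAS AND PROOFS =====

-- A's inner loop appends `e` once per iteration: it builds init ++ replicate (length) e.
theorem pv_foldl_append_const {α β : Type} (e : α) :
    ∀ (l : List β) (init : List α),
      l.foldl (fun acc _ => acc ++ [e]) init = init ++ List.replicate l.length e := by
  intro l
  induction l with
  | nil => intro init; simp
  | cons x xs ih =>
      intro init
      simp only [List.foldl_cons, ih, List.length_cons]
      simp [List.replicate_succ, List.append_assoc]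

-- A equals the flatMap-of-replicate closed form.
theorem pv_A_eq_flatMap (my_list : List Int) (m : Int) :
    create_list_duplicates my_list m = my_list.flatMap (List.replicate m.toNat) := by
  unfold create_list_duplicates
  have h : ∀ (xs : List Int) (init : List Int),
      xs.foldl (fun new_list element =>
        new_list ++ ((PySem.List.pyRange 0 m 1).foldl
          (fun list_element _ => list_element ++ [element]) [])) init
      = init ++ xs.flatMap (List.replicate m.toNat) := by
    intro xs
    induction xs with
    | nil => intro init; simp
    | cons x xs ih =>
        intro init
        simp only [List.foldl_cons, ih, List.flatMap_cons, List.append_assoc]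
        rw [pv_foldl_append_const]
        simp [PySem.List.length_pyRange_one]
  simpa using h my_list []

-- B's flat pass, stated over Nat indices: position k reads element k / m'.
theorem pv_flat_eq_flatMap (m' : Nat) (hm : 0 < m') :
    ∀ (xs : List Int),
      (List.range (xs.length * m')).map (fun k => xs.getD (k / m') 0)
        = xs.flatMap (List.replicate m') := by
  intro xs
  induction xs with
  | nil => simp
  | cons x xs ih =>
      have hlen : (x :: xs).length * m' = m' + xs.length * m' := by
        simp [List.length_cons]; ring
      rw [hlen, List.range_add, List.map_append, List.map_map]
      have h1 : (List.range m').map (fun k => (x :: xs).getD (k / m') 0)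
          = List.replicate m' x := by
        refine List.eq_replicate_iff.mpr ⟨by simp, ?_⟩
        intro y hy
        obtain ⟨k, hk, rfl⟩ := List.mem_map.mp hy
        have hk' := List.mem_range.mp hk
        have : k / m' = 0 := Nat.div_eq_of_lt hk'
        simp [this]
      have h2 : (List.range (xs.length * m')).map
            ((fun k => (x :: xs).getD (k / m') 0) ∘ (fun k => m' + k))
          = xs.flatMap (List.replicate m') := by
        rw [← ih]
        apply List.map_congr_left
        intro k _
        have : (m' + k) / m' = k / m' + 1 := by
          rw [Nat.add_comm m' k, Nat.add_div_right _ hm]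
        simp [Function.comp, this]
      rw [h1, h2, List.flatMap_cons]

-- B equals the same closed form.
theorem pv_B_eq_flatMap (my_list : List Int) (m : Int) :
    create_list_duplicates_alt my_list m = my_list.flatMap (List.replicate m.toNat) := by
  unfold create_list_duplicates_alt
  by_cases hm : m ≤ 0
  · have hle : (↑my_list.length * m : Int) ≤ 0 :=
      mul_nonpos_of_nonneg_of_nonpos (by positivity) hm
    rw [PySem.List.pyRange_one_eq_nil hle]
    have : m.toNat = 0 := Int.toNat_of_nonpos hm
    simp [this]
  · have hm : 0 < m := by omega
    set m' := m.toNat with hm'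
    have hmm : (m : Int) = ↑m' := by omega
    have hb : (↑my_list.length * m : Int) = ↑(my_list.length * m') := by
      rw [hmm]; push_cast; ring
    rw [hb, PySem.List.pyRange_zero_natCast, List.map_map]
    rw [← pv_flat_eq_flatMap m' (by omega) my_list]
    apply List.map_congr_left
    intro k _
    have h1 : PySem.Int.floordiv (↑k) (↑m') = ((k / m' : Nat) : Int) :=
      PySem.Int.floordiv_natCast k m'
    simp only [Function.comp, hmm, h1, PySem.List.pyGetD_natCast]

-- ===== VERDICT (by name: the statement is the Claim_ definition above) =====
theorem create_list_duplicates_spec : Claim_equal_create_list_duplicates := by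
  intro my_list m _
  unfold Spec_create_list_duplicates
  rw [pv_A_eq_flatMap, pv_B_eq_flatMap]
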